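-- pv_equiv track=rewrite | github.com/teacha1025/LaTex_Tools | plotter/source/main.py | __perse
-- ===== SOURCE A (Python) =====
-- def __perse(input:str):
--     l = input.split('\n')
--     lp = []
--     for i in range(len(l)):
--         lp.append(l[i].split('\t'))
--
--     length = len(lp[0])
--     max = len(l)
--
--     ret = []
--     for i in range(length):
--         now = 1
--         col = []
--         while now < max:
--             col.append(lp[now][i])
--             now += 1
--         ret.append(col)
--
--     return ret
-- ===== SOURCE B (Python) =====
-- def __perse(input: str):
--     rows = [line.split('\t') for line in input.split('\n')]
--     length = len(rows[0])
--     ret = [[] for _ in range(length)]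
--     for row in rows[1:]:
--         for i in range(length):
--             ret[i].append(row[i])
--     return ret
-- ===== Notes on version B (the rewrite author's own statement) =====
-- stated objective: alternative
-- what changed: B replaces A's column-major scan (one while-loop over all data rows per column, rebuilding a single-column buffer length times) by one row-major pass over the data rows that appends each cell to a pre-allocated list of columns.
import Mathlib
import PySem

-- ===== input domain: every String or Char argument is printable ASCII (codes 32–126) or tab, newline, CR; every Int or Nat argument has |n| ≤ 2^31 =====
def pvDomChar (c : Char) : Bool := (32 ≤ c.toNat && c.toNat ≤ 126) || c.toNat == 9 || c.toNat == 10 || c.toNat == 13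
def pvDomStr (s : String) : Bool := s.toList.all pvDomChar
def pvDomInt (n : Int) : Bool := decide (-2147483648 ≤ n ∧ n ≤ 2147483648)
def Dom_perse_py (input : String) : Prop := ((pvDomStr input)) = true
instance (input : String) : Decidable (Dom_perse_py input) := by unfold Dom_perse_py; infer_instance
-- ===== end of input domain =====

-- sep is a nonempty string literal at both call sites, so Python's split never raises; .getD [] is unreachable
def pvSplit (s sep : String) : List String := (PySem.Str.split? s sep).getD []

-- B rewrites A's column-major scan as one row-major pass over a pre-allocated list of columns; same cost, different traversal.

-- ===== PORT A =====
-- the 'while now < max: col.append(lp[now][i]); now += 1' loop of A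
def pvColLoop (lp : List (List String)) (i : Nat) (now mx : Nat) : List String :=
  if now < mx then ((lp.getD now []).getD i "") :: pvColLoop lp i (now + 1) mx
  else []
termination_by mx - now

def perse_py (input : String) : List (List String) :=
  let l := pvSplit input "\n"
  let lp := l.foldl (fun lp line => lp ++ [pvSplit line "\t"]) []
  let length := (lp.getD 0 []).length
  let mx := l.length
  (List.range length).foldl (fun ret i => ret ++ [pvColLoop lp i 1 mx]) []

-- ===== PORT B =====
def perse_py_alt (input : String) : List (List String) :=
  let rows := (pvSplit input "\n").map (fun line => pvSplit line "\t")
  let length := (rows.headD []).length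
  let init := (List.range length).map (fun _ => ([] : List String))
  (rows.drop 1).foldl
    (fun ret row => (List.range length).map (fun i => ret.getD i [] ++ [row.getD i ""])) init

-- ===== PRECONDITION & SPEC =====
-- Pre_ excludes exactly the ragged inputs on which A raises IndexError: a data row with
-- fewer tab-separated fields than the header row.
def Pre_perse_py (input : String) : Prop :=
  ∀ line ∈ (pvSplit input "\n").drop 1,
    (pvSplit ((pvSplit input "\n").headD "") "\t").length
      ≤ (pvSplit line "\t").length
instance (input : String) : Decidable (Pre_perse_py input) := by unfold Pre_perse_py; infer_instance
def pvWitness_perse_py : String := "a\tb\nc\td\ne\tf"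

def Spec_perse_py (input : String) (out : List (List String)) : Prop := out = perse_py_alt input
instance (input : String) (out : List (List String)) : Decidable (Spec_perse_py input out) := by unfold Spec_perse_py; infer_instance

-- ===== CLAIM (what is proved, stated in full; the proofs are below) =====
def Claim_equal_perse_py : Prop := ∀ (input : String), Dom_perse_py input → Pre_perse_py input → Spec_perse_py input (perse_py input)

-- ===== LEMMAS AND PROOFS =====

-- a foldl that appends singletons is a map
theorem pv_foldl_append_singleton {α β : Type} (g : α → β) :
    ∀ (l : List α) (acc : List β),
      l.foldl (fun r x => r ++ [g x]) acc = acc ++ l.map g := by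
  intro l
  induction l with
  | nil => simp
  | cons x xs ih => intro acc; simp [List.foldl, ih]

-- A's while loop reads off the i-th entry of every row from 'now' on
theorem pv_colLoop_eq (lp : List (List String)) (i : Nat) :
    ∀ (k now : Nat), lp.length - now = k →
      pvColLoop lp i now lp.length = (lp.drop now).map (fun r => r.getD i "") := by
  intro k
  induction k with
  | zero =>
    intro now h
    have hle : lp.length ≤ now := by omega
    rw [pvColLoop]
    simp [Nat.not_lt_of_le hle, List.drop_eq_nil_of_le hle]
  | succ k ih =>
    intro now h
    have hlt : now < lp.length := by omega
    rw [pvColLoop]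
    simp only [hlt, if_pos]
    rw [ih (now + 1) (by omega), List.drop_eq_getElem_cons hlt, List.map_cons]
    congr 1
    simp [List.getD_eq_getElem?_getD, List.getElem?_eq_getElem hlt]

theorem pv_getD_map_range {α : Type} (f : Nat → α) (d : α) {n i : Nat} (h : i < n) :
    ((List.range n).map f).getD i d = f i := by
  simp [List.getD_eq_getElem?_getD, List.getElem?_map, List.getElem?_range h]

-- B's row-major fold maintains all n columns at once
theorem pv_alt_fold (n : Nat) :
    ∀ (rows : List (List String)) (f : Nat → List String),
      rows.foldl
          (fun ret row => (List.range n).map (fun i => ret.getD i [] ++ [row.getD i ""]))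
          ((List.range n).map f)
        = (List.range n).map (fun i => f i ++ rows.map (fun r => r.getD i "")) := by
  intro rows
  induction rows with
  | nil => intro f; simp
  | cons row rows ih =>
    intro f
    simp only [List.foldl_cons]
    have hstep :
        (List.range n).map (fun i => ((List.range n).map f).getD i [] ++ [row.getD i ""])
          = (List.range n).map (fun i => f i ++ [row.getD i ""]) := by
      apply List.map_congr_left
      intro i hi
      rw [pv_getD_map_range f [] (List.mem_range.mp hi)]
    rw [hstep, ih (fun i => f i ++ [row.getD i ""])]
    simp

theorem pv_getD_zero_headD {α : Type} (l : List α) (d : α) : l.getD 0 d = l.headD d := by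
  cases l <;> rfl

-- ===== VERDICT (by name: the statement is the Claim_ definition above) =====
theorem perse_py_spec : Claim_equal_perse_py := by
  intro input _ _
  show perse_py input = perse_py_alt input
  unfold perse_py perse_py_alt
  simp only [pv_foldl_append_singleton, List.nil_append, pv_alt_fold, pv_getD_zero_headD]
  apply List.map_congr_left
  intro i _
  rw [show (pvSplit input "\n").length
        = ((pvSplit input "\n").map (fun line => pvSplit line "\t")).length by simp,
    pv_colLoop_eq _ i (((pvSplit input "\n").map (fun line => pvSplit line "\t")).length - 1) 1 rfl]
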